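-- pv_equiv track=rewrite | github.com/nikunjpanchal22/code_clone_classification | python_t4_full/Clone_233.py | get_most_ooo_word
-- ===== SOURCE A (Python) =====
-- def get_most_ooo_word(words_str):
--     words = words_str.split()
--     greatest = 0
--     chosen_words = []
--     for word in words:
--         current_o = word.count('o')
--         if current_o > greatest:
--             chosen_words = [word]
--             greatest = current_o
--         elif current_o == greatest:
--             chosen_words.append(word)
--     return chosen_words
-- ===== SOURCE B (Python) =====
-- def get_most_ooo_word(words_str):
--     buckets = {}
--     for w in words_str.split():
--         buckets.setdefault(w.count('o'), []).append(w)
--     if not buckets: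
--         return []
--     return buckets[max(buckets)]
-- ===== Notes on version B (the rewrite author's own statement) =====
-- stated objective: alternative
-- what changed: Replaces the running-max with tie-list tracking by a grouping dict from o-count to words (order preserved), then returns the bucket of the maximal key.
import Mathlib
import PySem

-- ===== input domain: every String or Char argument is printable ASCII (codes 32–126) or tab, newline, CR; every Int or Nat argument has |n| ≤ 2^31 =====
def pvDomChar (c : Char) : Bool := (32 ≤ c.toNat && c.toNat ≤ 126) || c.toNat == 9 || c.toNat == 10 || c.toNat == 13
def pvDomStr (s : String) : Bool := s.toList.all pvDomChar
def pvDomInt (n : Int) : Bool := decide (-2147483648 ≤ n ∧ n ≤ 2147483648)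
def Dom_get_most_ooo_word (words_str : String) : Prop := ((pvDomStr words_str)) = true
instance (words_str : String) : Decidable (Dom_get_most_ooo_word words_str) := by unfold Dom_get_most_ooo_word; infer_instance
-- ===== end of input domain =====

-- B replaces A's running-max/tie-list loop by a grouping dict from o-count to words, then returns the bucket of the maximal key (alternative decomposition, same cost).

-- ===== PORT A =====
def get_most_ooo_word (words_str : String) : List String :=
  let words := PySem.Str.split₀ words_str
  (words.foldl (fun (st : Int × List String) word =>
      let current_o : Int := ((PySem.Str.count word "o" : Nat) : Int)
      if current_o > st.1 then (current_o, [word])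
      else if current_o = st.1 then (st.1, st.2 ++ [word])
      else st) ((0 : Int), ([] : List String))).2

-- ===== PORT B =====
def get_most_ooo_word_alt (words_str : String) : List String :=
  let buckets : PySem.Dict Int (List String) :=
    (PySem.Str.split₀ words_str).foldl
      (fun d w => d.modify ((PySem.Str.count w "o" : Nat) : Int) [] (fun l => l ++ [w]))
      PySem.Dict.empty
  if buckets.size = 0 then []
  else
    match PySem.List.max? buckets.keys (fun x => x) with
    | none => []   -- unreachable: buckets is nonempty in this branch
    | some m => buckets.getD m []

-- ===== PRECONDITION & SPEC =====
def Spec_get_most_ooo_word (words_str : String) (out : List String) : Prop :=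
  out = get_most_ooo_word_alt words_str
instance (words_str : String) (out : List String) : Decidable (Spec_get_most_ooo_word words_str out) := by
  unfold Spec_get_most_ooo_word; infer_instance

-- ===== CLAIM =====
def Claim_equal_get_most_ooo_word : Prop :=
  ∀ (words_str : String), Dom_get_most_ooo_word words_str →
    Spec_get_most_ooo_word words_str (get_most_ooo_word words_str)

-- ===== LEMMAS AND PROOFS =====

/-- Characterisation of A's loop from any start state `(g, ch)` (counts abstracted as `f`):
the final `greatest` is the running max of the counts seeded with `g`, and the chosen list is
the kept prefix `ch` (kept iff the max never strictly exceeds `g`) followed by the words of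
`ws` whose count equals that max. -/
theorem pvFoldA_gen (f : String → Int) (ws : List String) (g : Int) (ch : List String) :
    ws.foldl (fun (st : Int × List String) word =>
      if f word > st.1 then (f word, [word])
      else if f word = st.1 then (st.1, st.2 ++ [word])
      else st) (g, ch)
    = (ws.foldl (fun a w => max a (f w)) g,
       (if ws.foldl (fun a w => max a (f w)) g = g then ch else [])
         ++ ws.filter (fun w => f w == ws.foldl (fun a w => max a (f w)) g)) := by
  induction ws generalizing g ch with
  | nil => simp
  | cons w rest ih =>
    simp only [List.foldl_cons, List.filter_cons]
    have hM := PySem.List.le_foldl_max_int rest f (max g (f w))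
    by_cases h1 : f w > g
    · have hgc : max g (f w) = f w := by omega
      simp only [hgc] at hM ⊢
      rw [if_pos h1, ih]
      have hMg : rest.foldl (fun a w => max a (f w)) (f w) ≠ g := by have := hM.1; omega
      rw [if_neg hMg]
      by_cases h2 : f w = rest.foldl (fun a w => max a (f w)) (f w)
      · simp [← h2]
      · have hb : (f w == rest.foldl (fun a w => max a (f w)) (f w)) = false := by simp [h2]
        simp [hb]; exact fun h => h2 h.symm
    · have hgc : max g (f w) = g := by omega
      simp only [hgc] at hM ⊢
      rw [if_neg h1]
      by_cases h2 : f w = g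
      · rw [if_pos h2, ih]
        by_cases h3 : rest.foldl (fun a w => max a (f w)) g = g
        · have hb : (f w == rest.foldl (fun a w => max a (f w)) g) = true := by simp [h2, h3]
          simp [h3, h2]
        · have hb : (f w == rest.foldl (fun a w => max a (f w)) g) = false := by simp; omega
          simp [h3, hb]
      · rw [if_neg h2, ih]
        have hb : (f w == rest.foldl (fun a w => max a (f w)) g) = false := by
          simp; have := hM.1; omega
        simp [hb]


theorem pvMain_eq (s : String) : get_most_ooo_word s = get_most_ooo_word_alt s := by
  show (List.foldl (fun (st : Int × List String) word =>
      if ((PySem.Str.count word "o" : Nat) : Int) > st.1 then (((PySem.Str.count word "o" : Nat) : Int), [word])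
      else if ((PySem.Str.count word "o" : Nat) : Int) = st.1 then (st.1, st.2 ++ [word])
      else st) ((0 : Int), ([] : List String)) (PySem.Str.split₀ s)).2
    = (if (List.foldl (fun (d : PySem.Dict Int (List String)) w =>
            d.modify ((PySem.Str.count w "o" : Nat) : Int) [] (fun l => l ++ [w]))
            PySem.Dict.empty (PySem.Str.split₀ s)).size = 0 then []
       else
         match PySem.List.max? (List.foldl (fun (d : PySem.Dict Int (List String)) w =>
            d.modify ((PySem.Str.count w "o" : Nat) : Int) [] (fun l => l ++ [w]))
            PySem.Dict.empty (PySem.Str.split₀ s)).keys (fun x => x) with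
         | none => []
         | some m => (List.foldl (fun (d : PySem.Dict Int (List String)) w =>
            d.modify ((PySem.Str.count w "o" : Nat) : Int) [] (fun l => l ++ [w]))
            PySem.Dict.empty (PySem.Str.split₀ s)).getD m [])
  set ws := PySem.Str.split₀ s with hws
  set cnt : String → Int := fun w => ((PySem.Str.count w "o" : Nat) : Int) with hcnt
  rw [pvFoldA_gen cnt ws 0 []]
  set B := List.foldl (fun (d : PySem.Dict Int (List String)) w =>
            d.modify (cnt w) [] (fun l => l ++ [w])) PySem.Dict.empty ws with hB
  have hkeys : B.keys = PySem.Set.ofList (ws.map cnt) := by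
    rw [hB, PySem.Dict.keys_foldl_modify_key ws cnt [] (fun _ x => fun l => l ++ [x])]
    simp [PySem.Set.update, PySem.Set.ofList_eq_foldl, PySem.Dict.keys_empty]
  have hgetD : ∀ c : Int, B.getD c [] = ws.filter (fun w => cnt w == c) := by
    intro c
    have h := PySem.Dict.getD_foldl_modify_append (ws.map (fun w => (cnt w, w)))
      (PySem.Dict.empty : PySem.Dict Int (List String)) c
    rw [List.foldl_map] at h
    rw [hB]
    rw [List.filter_map] at h
    simpa [Function.comp_def] using h
  by_cases hnil : ws = []
  · simp only [hnil, List.foldl_nil] at hB ⊢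
    simp [hB]
  · obtain ⟨w0, hw0⟩ := List.exists_mem_of_ne_nil ws hnil
    have hkmem : cnt w0 ∈ B.keys := by
      rw [hkeys, PySem.Set.mem_ofList]
      exact List.mem_map_of_mem hw0
    have hsize : ¬ B.size = 0 := by
      have : B.keys.length ≠ 0 := by
        intro h
        rw [List.length_eq_zero_iff] at h
        simp [h] at hkmem
      simpa [PySem.Dict.size, PySem.Dict.keys, List.length_map] using this
    rw [if_neg hsize]
    rcases hmax : PySem.List.max? B.keys (fun x => x) with _ | m
    · rw [PySem.List.max?_eq_none_iff] at hmax
      simp [hmax] at hkmem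
    · have hmem : m ∈ ws.map cnt := by
        have := PySem.List.max?_mem hmax
        rwa [hkeys, PySem.Set.mem_ofList] at this
      have hub : ∀ y ∈ ws.map cnt, y ≤ m := by
        intro y hy
        exact PySem.List.max?_isMax hmax y (by rw [hkeys, PySem.Set.mem_ofList]; exact hy)
      have hM0 : ws.foldl (fun a w => max a (cnt w)) 0 = (ws.map cnt).foldl max 0 := by
        rw [List.foldl_map]
      have hfl := PySem.List.le_foldl_max (ws.map cnt) 0
      have heq : ws.foldl (fun a w => max a (cnt w)) 0 = m := by
        rcases PySem.List.foldl_max_mem (ws.map cnt) 0 with h0 | hmm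
        · rw [hM0, h0]
          have hm_le : m ≤ 0 := by have := hfl.2 m hmem; rw [h0] at this; exact this
          have hm_ge : 0 ≤ m := by
            obtain ⟨x, _, rfl⟩ := List.mem_map.mp hmem
            simp [hcnt]
          omega
        · exact le_antisymm (by rw [hM0]; exact hub _ hmm) (by rw [hM0]; exact hfl.2 m hmem)
      show _ = B.getD m []
      rw [hgetD m, heq]
      simp

-- ===== VERDICT =====
theorem get_most_ooo_word_spec : Claim_equal_get_most_ooo_word := by
  intro s _
  unfold Spec_get_most_ooo_word
  exact pvMain_eq s
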